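-- pv_equiv track=rewrite | github.com/jnclt/hackerrank | bigSorting.py | bigSorting
-- ===== SOURCE A (Python) =====
-- def bigSorting(unsorted):
--     lengths = {}
--     for s in unsorted:
--         lengths.setdefault(len(s), []).append(s)
--     big_sorted = []
--     for length in sorted(lengths.keys()):
--         big_sorted.extend(sorted(lengths[length]))
--     return big_sorted
-- ===== SOURCE B (Python) =====
-- def bigSorting(unsorted):
--     return sorted(unsorted, key=lambda s: (len(s), s))
-- ===== Notes on version B (the rewrite author's own statement) =====
-- stated objective: simpler
-- what changed: Removes the length->bucket dict and the per-bucket sorting passes; a single comparison sort with the composite key (len(s), s) produces the same length-then-lexicographic order.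
import Mathlib
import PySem

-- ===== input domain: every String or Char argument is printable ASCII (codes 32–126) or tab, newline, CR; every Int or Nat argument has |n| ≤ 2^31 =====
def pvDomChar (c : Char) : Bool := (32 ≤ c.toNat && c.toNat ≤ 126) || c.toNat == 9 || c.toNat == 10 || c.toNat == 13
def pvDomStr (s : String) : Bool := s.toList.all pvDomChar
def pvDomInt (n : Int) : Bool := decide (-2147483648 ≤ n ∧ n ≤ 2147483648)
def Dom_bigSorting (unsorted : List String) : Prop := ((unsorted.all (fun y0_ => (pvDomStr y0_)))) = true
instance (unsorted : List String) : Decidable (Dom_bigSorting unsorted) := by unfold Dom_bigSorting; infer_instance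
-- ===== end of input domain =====

-- B replaces A's length-bucket dict plus per-bucket sorts by one sorted() call with the
-- composite key (len(s), s); same return value, B is simpler (objective: simpler).

-- ===== PORT A =====
def bigSorting (unsorted : List String) : List String :=
  let lengths : PySem.Dict Int (List String) :=
    unsorted.foldl (fun d s => d.modify ((s.length : Int)) [] (fun v => v ++ [s])) PySem.Dict.empty
  (PySem.List.sorted lengths.keys (fun k => k)).foldl
    (fun acc k => acc ++ PySem.List.sorted (lengths.getD k []) (fun x => x)) []

-- ===== PORT B =====
def bigSorting_alt (unsorted : List String) : List String :=
  PySem.List.sorted2 unsorted (fun s => ((s.length : Int))) (fun s => s)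

-- ===== PRECONDITION & SPEC =====
def Spec_bigSorting (unsorted : List String) (out : List String) : Prop := out = bigSorting_alt unsorted
instance (unsorted : List String) (out : List String) : Decidable (Spec_bigSorting unsorted out) := by unfold Spec_bigSorting; infer_instance

-- ===== CLAIM (what is proved, stated in full; the proofs are below) =====
def Claim_equal_bigSorting : Prop := ∀ (unsorted : List String), Dom_bigSorting unsorted → Spec_bigSorting unsorted (bigSorting unsorted)

-- ===== LEMMAS AND PROOFS =====

/-- integer length of a string, as A's dict key -/
def lenI (s : String) : Int := (s.length : Int)

/-- the bucket of `l` at length `k` (elements of length `k`, in order) -/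
def grp (l : List String) (k : Int) : List String := l.filter (fun s => lenI s == k)

/-- the composite sort key (len(s), s), with lexicographic pair order -/
def keyL (s : String) : Lex (Int × String) := toLex (lenI s, s)

lemma keyL_injective : Function.Injective keyL := by
  intro a b h
  have := congrArg (fun p => (ofLex p).2) h
  simpa [keyL] using this

lemma key_lt_decide (a b : String) :
    decide (keyL a < keyL b)
      = (decide (lenI a < lenI b) || (!decide (lenI b < lenI a) && decide (a < b))) := by
  rcases lt_trichotomy (lenI a) (lenI b) with h | h | h
  · simp [keyL, Prod.Lex.lt_iff, h, asymm h]
  · simp [keyL, Prod.Lex.lt_iff, h]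
  · simp [keyL, Prod.Lex.lt_iff, asymm h, h, h.ne']

/-- B's port is `sorted` with the lexicographic composite key. -/
lemma alt_eq_sorted_keyL (l : List String) :
    bigSorting_alt l = PySem.List.sorted l keyL := by
  rw [bigSorting_alt, PySem.List.sorted_eq_foldl_insertBy]
  show List.foldl (fun acc x => PySem.List.insertBy
      (fun a b => decide (lenI a < lenI b) || (!decide (lenI b < lenI a) && decide (a < b))) x acc) [] l
    = _
  have : (fun a b => decide (lenI a < lenI b) || (!decide (lenI b < lenI a) && decide (a < b)))
      = (fun a b => decide (keyL a < keyL b)) := by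
    funext a b; rw [key_lt_decide]
  rw [this]

/-- looking up a key present in a `ks.map (fun k => (k, f k))` dict -/
lemma get?_map_mem (ks : List Int) (f : Int → List String) (k : Int) (hk : k ∈ ks) :
    (PySem.Dict.mk (ks.map (fun k' => (k', f k')))).get? k = some (f k) := by
  induction ks with
  | nil => cases hk
  | cons a t ih =>
    simp only [List.map_cons, PySem.Dict.get?_mk_cons]
    by_cases hak : a = k
    · simp [hak]
    · have : k ∈ t := by cases hk with
        | head => exact absurd rfl hak
        | tail _ h => exact h
      simp [hak, ih this]

/-- the grouping loop of A in closed form: keys are the distinct lengths in first-occurrence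
    order, values are the length-buckets -/
lemma dict_items (l : List String) :
    (l.foldl (fun d s => d.modify (lenI s) [] (fun v => v ++ [s])) PySem.Dict.empty).items
      = (PySem.Set.ofList (l.map lenI)).map (fun k => (k, grp l k)) := by
  induction l using List.reverseRecOn with
  | nil => simp [PySem.Dict.empty, PySem.Set.ofList, PySem.Set.empty, grp]
  | append_singleton l s ih =>
    rw [List.foldl_append, List.foldl_cons, List.foldl_nil]
    have hset : PySem.Set.ofList ((l ++ [s]).map lenI)
        = PySem.Set.add (PySem.Set.ofList (l.map lenI)) (lenI s) := by
      simp [PySem.Set.ofList, List.foldl_append]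
    have hgrp : ∀ k, grp (l ++ [s]) k = grp l k ++ (if lenI s == k then [s] else []) := by
      intro k; by_cases h : lenI s = k <;> simp [grp, List.filter_append, h]
    -- the dict after the prefix
    set D := l.foldl (fun d s => d.modify (lenI s) [] (fun v => v ++ [s])) PySem.Dict.empty with hD
    set ks := PySem.Set.ofList (l.map lenI) with hks
    have hitems : D.items = ks.map (fun k => (k, grp l k)) := ih
    have hcontains : D.contains (lenI s) = decide (lenI s ∈ ks) := by
      rcases D with ⟨items⟩
      simp only at hitems
      subst hitems
      by_cases h : lenI s ∈ ks
      · simp [PySem.Dict.contains_mk, List.any_map, List.any_eq_true, h]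
      · simp only [PySem.Dict.contains_mk, List.any_map, h, decide_false]
        simp only [List.any_eq_false]
        intro k hk
        simp only [Function.comp, beq_iff_eq]
        exact fun hkk => h (hkk ▸ hk)
    have hmodify : D.modify (lenI s) [] (fun v => v ++ [s])
        = D.insert (lenI s) (D.getD (lenI s) [] ++ [s]) := rfl
    by_cases hmem : lenI s ∈ ks
    · -- existing length: value replaced in place, key set unchanged
      have hget : D.get? (lenI s) = some (grp l (lenI s)) := by
        rcases D with ⟨items⟩; simp only at hitems; subst hitems
        exact get?_map_mem ks _ _ hmem
      have hadd : PySem.Set.add ks (lenI s) = ks := by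
        simp [PySem.Set.add, PySem.Set.contains, hmem]
      rw [hmodify, PySem.Dict.insert, hcontains]
      simp only [hmem, decide_true, if_true]
      rw [hset, hadd]
      have hgetD : D.getD (lenI s) [] = grp l (lenI s) := by
        simp [PySem.Dict.getD, hget]
      rw [hgetD, hitems, List.map_map]
      apply List.map_congr_left
      intro k hk
      by_cases hkk : k = lenI s
      · subst hkk; simp [hgrp]
      · have h1 : (k == lenI s) = false := by simp [hkk]
        have h2 : (lenI s == k) = false := by
          rw [beq_eq_false_iff_ne]; exact fun h => hkk h.symm
        simp [Function.comp, h1, h2, hgrp]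
    · -- new length: key appended at the end, bucket is [s]
      have hgrpl : grp l (lenI s) = [] := by
        rw [grp, List.filter_eq_nil_iff]
        intro x hx
        have : lenI x ∈ ks := by
          rw [hks, PySem.Set.mem_ofList]; exact List.mem_map_of_mem hx
        intro hbe
        exact hmem (by rwa [show lenI x = lenI s from by simpa using hbe] at this)
      have hget : D.get? (lenI s) = none := by
        rcases D with ⟨items⟩; simp only at hitems; subst hitems
        simp only [PySem.Dict.get?, Option.map_eq_none_iff, List.find?_eq_none]
        intro p hp
        rw [List.mem_map] at hp
        obtain ⟨k, hk, rfl⟩ := hp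
        simp only [beq_iff_eq]
        intro h; exact hmem (h ▸ hk)
      have hadd : PySem.Set.add ks (lenI s) = ks ++ [lenI s] := by
        simp [PySem.Set.add, PySem.Set.contains, hmem]
      rw [hmodify, PySem.Dict.insert, hcontains]
      simp only [hmem, decide_false, Bool.false_eq_true, if_false]
      rw [hset, hadd]
      have hgetD : D.getD (lenI s) [] = [] := by simp [PySem.Dict.getD, hget]
      rw [hgetD, hitems, List.map_append]
      congr 1
      · apply List.map_congr_left
        intro k hk
        have hkk : k ≠ lenI s := fun h => hmem (h ▸ hk)
        have h2 : (lenI s == k) = false := by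
          rw [beq_eq_false_iff_ne]; exact fun h => hkk h.symm
        simp [hgrp, h2]
      · simp [hgrp, hgrpl]

/-- buckets over a nodup covering key list reassemble the original list (up to order) -/
lemma flatMap_grp_perm (ks : List Int) : ∀ (l : List String), ks.Nodup →
    (∀ x ∈ l, lenI x ∈ ks) → (ks.flatMap (grp l)).Perm l := by
  induction ks with
  | nil =>
    intro l _ hcov
    cases l with
    | nil => simp
    | cons a t => exact absurd (hcov a (by simp)) (by simp)
  | cons k t ih =>
    intro l hnd hcov
    rw [List.flatMap_cons]
    have hrest : t.flatMap (grp l) = t.flatMap (grp (l.filter (fun s => !(lenI s == k)))) := by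
      apply List.flatMap_congr
      intro k' hk'
      have hkk : k' ≠ k := fun h => (List.nodup_cons.mp hnd).1 (h ▸ hk')
      simp only [grp, List.filter_filter]
      apply List.filter_congr
      intro x _
      by_cases h : lenI x = k'
      · have hne : (lenI x == k) = false := by
          rw [beq_eq_false_iff_ne, h]; exact hkk
        simp [h, hkk]
      · simp [h]
    rw [hrest]
    have hperm2 : (t.flatMap (grp (l.filter (fun s => !(lenI s == k))))).Perm
        (l.filter (fun s => !(lenI s == k))) := by
      apply ih _ (List.nodup_cons.mp hnd).2
      intro x hx
      have hx' := List.mem_filter.mp hx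
      have := hcov x hx'.1
      cases List.mem_cons.mp this with
      | inl h => exact absurd h (by simpa using hx'.2)
      | inr h => exact h
    calc (grp l k ++ t.flatMap (grp (l.filter (fun s => !(lenI s == k))))).Perm
          (grp l k ++ l.filter (fun s => !(lenI s == k))) := List.Perm.append_left _ hperm2
      _ = (l.filter (fun s => lenI s == k) ++ l.filter (fun s => !(lenI s == k))) := rfl
      _ |>.Perm l := List.filter_append_perm _ l

/-- pointwise permutations lift through flatMap -/
lemma flatMap_perm_congr {α β : Type} (ks : List α) (f g : α → List β)
    (h : ∀ k ∈ ks, (f k).Perm (g k)) : (ks.flatMap f).Perm (ks.flatMap g) := by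
  induction ks with
  | nil => simp
  | cons a t ih =>
    rw [List.flatMap_cons, List.flatMap_cons]
    exact (h a (by simp)).append (ih (fun k hk => h k (List.mem_cons_of_mem a hk)))

lemma mem_grp_len {l : List String} {k : Int} {x : String} (hx : x ∈ grp l k) : lenI x = k := by
  simpa using (List.mem_filter.mp hx).2

/-- A's output in closed form: buckets in increasing length order, each bucket sorted -/
lemma bigSorting_eq_flatMap (l : List String) :
    bigSorting l = (PySem.List.sorted (PySem.Set.ofList (l.map lenI)) (fun k => k)).flatMap
      (fun k => PySem.List.sorted (grp l k) (fun x => x)) := by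
  rw [bigSorting]
  set D := l.foldl (fun d s => d.modify (lenI s) [] (fun v => v ++ [s])) PySem.Dict.empty with hD
  set ks := PySem.Set.ofList (l.map lenI) with hks
  have hitems : D.items = ks.map (fun k => (k, grp l k)) := dict_items l
  have hkeys : D.keys = ks := by
    rw [PySem.Dict.keys, hitems, List.map_map]
    exact List.map_id ks
  rw [show (fun (d : PySem.Dict Int (List String)) (s : String) =>
        d.modify ((s.length : Int)) [] (fun v => v ++ [s]))
      = (fun d s => d.modify (lenI s) [] (fun v => v ++ [s])) from rfl, ← hD, hkeys]
  rw [PySem.List.foldl_congr_mem _ _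
    (fun acc k => acc ++ PySem.List.sorted (grp l k) (fun x => x)) _ ?_]
  · rw [PySem.List.foldl_append_eq_flatMap]; simp
  · intro acc k hk
    have hkmem : k ∈ ks := (PySem.List.mem_sorted _ _ _ _).mp hk
    have hget : D.get? k = some (grp l k) := by
      rcases D with ⟨items⟩; simp only at hitems; subst hitems
      exact get?_map_mem ks _ _ hkmem
    simp [PySem.Dict.getD, hget]

-- ===== VERDICT (by name: the statement is the Claim_ definition above) =====
theorem bigSorting_spec : Claim_equal_bigSorting := by
  intro l _
  show bigSorting l = bigSorting_alt l
  rw [alt_eq_sorted_keyL, bigSorting_eq_flatMap]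
  set ks := PySem.List.sorted (PySem.Set.ofList (l.map lenI)) (fun k => k) with hksdef
  have hksnd : ks.Nodup :=
    ((PySem.List.sorted_perm _ _ _).nodup_iff).mpr (PySem.Set.nodup_ofList _)
  have hkslt : ks.Pairwise (· < ·) := PySem.List.sorted_ofList_pairwise_lt _
  apply PySem.List.eq_of_perm_of_pairwise_le_of_injective keyL keyL_injective
  · -- permutation
    have h1 : (ks.flatMap (fun k => PySem.List.sorted (grp l k) (fun x => x))).Perm
        (ks.flatMap (grp l)) :=
      flatMap_perm_congr _ _ _ (fun k _ => PySem.List.sorted_perm _ _ _)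
    have h2 : (ks.flatMap (grp l)).Perm l := by
      apply flatMap_grp_perm _ _ hksnd
      intro x hx
      rw [hksdef, PySem.List.mem_sorted, PySem.Set.mem_ofList]
      exact List.mem_map_of_mem hx
    exact (h1.trans h2).trans (PySem.List.sorted_perm l keyL false).symm
  · -- A's output is pairwise ≤ under the composite key
    rw [List.flatMap_def, List.pairwise_flatten]
    constructor
    · intro b hb
      rw [List.mem_map] at hb
      obtain ⟨k, _, rfl⟩ := hb
      apply (PySem.List.sorted_pairwise (grp l k) (fun x => x)).imp_of_mem
      intro a b ha hb hab
      have ha' := mem_grp_len ((PySem.List.mem_sorted _ _ _ _).mp ha)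
      have hb' := mem_grp_len ((PySem.List.mem_sorted _ _ _ _).mp hb)
      rw [keyL, keyL, Prod.Lex.le_iff]
      exact Or.inr ⟨by simp [ha', hb'], hab⟩
    · rw [List.pairwise_map]
      apply hkslt.imp
      intro k₁ k₂ hlt x hx y hy
      have hx' := mem_grp_len ((PySem.List.mem_sorted _ _ _ _).mp hx)
      have hy' := mem_grp_len ((PySem.List.mem_sorted _ _ _ _).mp hy)
      apply le_of_lt
      rw [keyL, keyL, Prod.Lex.lt_iff]
      exact Or.inl (by simp [hx', hy', hlt])
  · exact PySem.List.sorted_pairwise l keyL
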